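-- pv_equiv track=rewrite | github.com/elizaveta24/criptography | polibius.py | decrypt_polibiy
-- ===== SOURCE A (Python) =====
-- abc = {"а":"11", "б":"12", "в":"13",
-- "г":"14", "д":"15", "е":"16", "ж":"21",
-- "з":"22", "и":"23", "й":"24","к":"25",
-- "л":"26", "м":"31", "н":"32", "о":"33",
-- "п":"34", "р":"35", "с":"36", "т":"41",
-- "у":"42", "ф":"43", "х":"44", "ц":"45",
-- "ч":"46", "ш":"51", "щ":"52", "ъ":"53",
-- "ы":"54", "ь":"55", "э":"56", "ю":"61",
-- "я":"62"}
--
-- def decrypt_polibiy(text):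
--     decrypt = ""
--     temp = ""
--     for i in text:
-- 	    if i != " ":
-- 		    temp += i
-- 	    else:
-- 		    for j in abc:
-- 			    if abc[j] == temp:
-- 				    decrypt += j
-- 		    temp = ""
--     return decrypt
-- ===== SOURCE B (Python) =====
-- LETTERS = "абвгдежзийклмнопрстуфхцчшщъыьэюя"
--
-- def decrypt_polibiy(text):
--     # arithmetic decode: code "rc" (digits 1-6) maps to LETTERS[(r-1)*6 + (c-1)]
--     out = []
--     for tok in text.split(' ')[:-1]:
--         if len(tok) == 2 and tok[0] in "123456" and tok[1] in "123456":
--             idx = (ord(tok[0]) - 49) * 6 + (ord(tok[1]) - 49)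
--             if idx < 32:
--                 out.append(LETTERS[idx])
--     return "".join(out)
-- ===== Notes on version B (the rewrite author's own statement) =====
-- stated objective: faster
-- what changed: Replaces the char-by-char accumulator loop that scans the whole 32-entry table at every space with space-tokenisation (dropping the unflushed last segment, like A) and an arithmetic decode (r-1)*6+(c-1) indexing a 32-letter string, so the table scan disappears entirely.
import Mathlib
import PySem

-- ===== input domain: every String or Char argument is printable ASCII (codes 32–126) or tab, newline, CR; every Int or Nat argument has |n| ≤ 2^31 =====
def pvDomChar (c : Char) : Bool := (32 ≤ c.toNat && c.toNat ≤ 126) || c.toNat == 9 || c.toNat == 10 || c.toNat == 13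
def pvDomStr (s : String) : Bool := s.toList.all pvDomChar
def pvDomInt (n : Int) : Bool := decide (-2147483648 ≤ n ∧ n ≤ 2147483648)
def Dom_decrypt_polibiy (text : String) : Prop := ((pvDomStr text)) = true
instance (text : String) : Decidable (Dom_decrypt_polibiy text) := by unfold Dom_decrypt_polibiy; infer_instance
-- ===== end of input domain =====

-- B drops A's table entirely: it tokenises on spaces (discarding the unflushed last segment,
-- exactly as A does) and decodes each two-digit token arithmetically into a 32-letter string.

-- ===== PORT A =====

-- the module-level dict abc, in insertion order (letter, code)
def pvAbc : List (List Char × List Char) :=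
  [("а".toList,"11".toList), ("б".toList,"12".toList), ("в".toList,"13".toList),
   ("г".toList,"14".toList), ("д".toList,"15".toList), ("е".toList,"16".toList), ("ж".toList,"21".toList),
   ("з".toList,"22".toList), ("и".toList,"23".toList), ("й".toList,"24".toList), ("к".toList,"25".toList),
   ("л".toList,"26".toList), ("м".toList,"31".toList), ("н".toList,"32".toList), ("о".toList,"33".toList),
   ("п".toList,"34".toList), ("р".toList,"35".toList), ("с".toList,"36".toList), ("т".toList,"41".toList),
   ("у".toList,"42".toList), ("ф".toList,"43".toList), ("х".toList,"44".toList), ("ц".toList,"45".toList),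
   ("ч".toList,"46".toList), ("ш".toList,"51".toList), ("щ".toList,"52".toList), ("ъ".toList,"53".toList),
   ("ы".toList,"54".toList), ("ь".toList,"55".toList), ("э".toList,"56".toList), ("ю".toList,"61".toList),
   ("я".toList,"62".toList)]

-- A's inner loop: 'for j in abc: if abc[j] == temp: decrypt += j'
def pvScan (temp : List Char) : List Char :=
  pvAbc.foldl (fun acc p => if p.2 == temp then acc ++ p.1 else acc) []

-- A's outer loop over the characters of text, state (decrypt, temp)
def pvGoA : List Char → List Char → List Char → List Char
  | [], decrypt, _ => decrypt
  | c :: cs, decrypt, temp =>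
      if c ≠ ' ' then pvGoA cs decrypt (temp ++ [c])
      else pvGoA cs (decrypt ++ pvScan temp) []

def decrypt_polibiy (text : String) : String :=
  String.ofList (pvGoA text.toList [] [])

-- ===== PORT B =====

-- LETTERS = "абвгдежзийклмнопрстуфхцчшщъыьэюя"
def pvLetters : List Char := "абвгдежзийклмнопрстуфхцчшщъыьэюя".toList

-- "123456"
def pvDigits : List Char := ['1', '2', '3', '4', '5', '6']

-- B's loop body for one token: len==2, both chars digits 1-6, idx=(r-1)*6+(c-1)<32 → LETTERS[idx]
-- (LETTERS[idx] is in range under the guard idx < 32, so getD is exact here)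
def pvDecode (t : List Char) : List Char :=
  match t with
  | [a, b] =>
      if a ∈ pvDigits ∧ b ∈ pvDigits then
        let idx := (a.toNat - 49) * 6 + (b.toNat - 49)
        if idx < 32 then [pvLetters.getD idx ' '] else []
      else []
  | _ => []

-- ''.join over the loop = flatMap of the per-token pieces over split(' ')[:-1]
def decrypt_polibiy_alt (text : String) : String :=
  String.ofList (((text.toList.splitOn ' ').dropLast).flatMap pvDecode)

-- ===== PRECONDITION & SPEC =====
def Spec_decrypt_polibiy (text : String) (out : String) : Prop := out = decrypt_polibiy_alt text
instance (text : String) (out : String) : Decidable (Spec_decrypt_polibiy text out) := by unfold Spec_decrypt_polibiy; infer_instance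

-- ===== CLAIM (what is proved, stated in full; the proofs are below) =====
def Claim_equal_decrypt_polibiy : Prop := ∀ (text : String), Dom_decrypt_polibiy text → Spec_decrypt_polibiy text (decrypt_polibiy text)

-- ===== LEMMAS AND PROOFS =====

-- A's scan finds nothing when no code equals temp
lemma scan_zero (ps : List (List Char × List Char)) (t acc : List Char)
    (h : ∀ p ∈ ps, p.2 ≠ t) :
    ps.foldl (fun acc p => if p.2 == t then acc ++ p.1 else acc) acc = acc := by
  induction ps generalizing acc with
  | nil => rfl
  | cons hd tl ih =>
      simp only [List.foldl_cons]
      rw [if_neg (by simpa using h hd (List.mem_cons_self))]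
      exact ih acc (fun p hp => h p (List.mem_cons_of_mem _ hp))

-- every code in the table is two digit characters from pvDigits
lemma abc_codes_shape : ∀ p ∈ pvAbc, p.2.length = 2 ∧ ∀ c ∈ p.2, c ∈ pvDigits := by
  intro p hp; fin_cases hp <;> exact ⟨by decide, by simp [pvDigits]⟩

-- the key bridge: A's table scan of one segment equals B's arithmetic decode of that token
lemma scan_eq_decode (t : List Char) : pvScan t = pvDecode t := by
  match t with
  | [] =>
      rw [pvScan, scan_zero _ _ _ (fun p hp heq => by
        have := (abc_codes_shape p hp).1; rw [heq] at this; simp at this)]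
      rfl
  | [a] =>
      rw [pvScan, scan_zero _ _ _ (fun p hp heq => by
        have := (abc_codes_shape p hp).1; rw [heq] at this; simp at this)]
      rfl
  | a :: b :: c :: rest =>
      rw [pvScan, scan_zero _ _ _ (fun p hp heq => by
        have := (abc_codes_shape p hp).1; rw [heq] at this; simp at this)]
      rfl
  | [a, b] =>
      by_cases ha : a ∈ pvDigits
      · by_cases hb : b ∈ pvDigits
        · fin_cases ha <;> fin_cases hb <;> decide
        · rw [pvScan, scan_zero _ _ _ (fun p hp heq => by
            have := (abc_codes_shape p hp).2 b (by rw [heq]; simp)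
            exact hb this)]
          simp [pvDecode, hb]
      · rw [pvScan, scan_zero _ _ _ (fun p hp heq => by
          have := (abc_codes_shape p hp).2 a (by rw [heq]; simp)
          exact ha this)]
        simp [pvDecode, ha]

-- the main loop invariant: temp never contains a space, and pvGoA computes
-- decrypt ++ the decoded pieces of all but the last ' '-token of temp ++ rest
lemma pvGoA_eq (cs : List Char) : ∀ (d t : List Char), (∀ x ∈ t, x ≠ ' ') →
    pvGoA cs d t
      = d ++ (((t ++ cs).splitOn ' ').dropLast).flatMap pvDecode := by
  induction cs with
  | nil =>
      intro d t ht
      have h1 : t.splitOn ' ' = [t] := by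
        simpa [List.splitOn] using List.splitOnP_eq_single (p := (· == ' ')) (xs := t)
          (by intro x hx; simpa using ht x hx)
      simp [pvGoA, h1]
  | cons c cs ih =>
      intro d t ht
      by_cases hc : c = ' '
      · subst hc
        have hsplit : (t ++ ' ' :: cs).splitOn ' ' = t :: cs.splitOn ' ' := by
          simpa [List.splitOn] using List.splitOnP_first (p := (· == ' '))
            (xs := t) (h := by intro x hx; simpa using ht x hx) ' ' (by simp) cs
        have hne : cs.splitOn ' ' ≠ [] := List.splitOnP_ne_nil _ _
        rw [show pvGoA (' ' :: cs) d t = pvGoA cs (d ++ pvScan t) [] from by simp [pvGoA],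
            ih (d ++ pvScan t) [] (by simp)]
        rw [hsplit, List.dropLast_cons_of_ne_nil hne, List.flatMap_cons, scan_eq_decode]
        simp
      · rw [show pvGoA (c :: cs) d t = pvGoA cs d (t ++ [c]) from by simp [pvGoA, hc],
            ih d (t ++ [c]) (by
              intro x hx
              rcases List.mem_append.1 hx with h | h
              · exact ht x h
              · simp at h; subst h; exact hc)]
        simp

-- ===== VERDICT (by name: the statement is the Claim_ definition above) =====
theorem decrypt_polibiy_spec : Claim_equal_decrypt_polibiy := by
  intro text _
  unfold Spec_decrypt_polibiy decrypt_polibiy decrypt_polibiy_alt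
  rw [pvGoA_eq text.toList [] [] (by simp)]
  simp
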